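-- pv_equiv track=rewrite | github.com/UlsanCollege-English/week-13-problem-2-course-enrollment-roster-Tulseyy | main.py | build_roster
-- ===== SOURCE A (Python) =====
-- def build_roster(registrations):
--     """
--     Given a list of (student_id, course_id) pairs, build a course roster.
--
--     The result should be a dictionary where:
--       - each key is a course id (string)
--       - each value is a sorted list of unique student ids (strings)
--         enrolled in that course
--
--     Duplicate registrations for the same (student_id, course_id) pair
--     should appear only once in the output.
--     """
--
--     # Group registrations by course using a dictionary with sets to track unique students
--     roster = {}
--     for student_id, course_id in registrations:
--         if course_id not in roster:
--             roster[course_id] = set()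
--         roster[course_id].add(student_id)
--
--     # Convert sets to sorted lists
--     for course_id in roster:
--         roster[course_id] = sorted(roster[course_id])
--
--     return roster
-- ===== SOURCE B (Python) =====
-- def build_roster(registrations):
--     # Simpler: dedupe the course order once, then build each course's entry
--     # directly as the sorted set of its students.
--     courses = list(dict.fromkeys(course_id for _, course_id in registrations))
--     return {c: sorted({s for s, cc in registrations if cc == c}) for c in courses}
-- ===== Notes on version B (the rewrite author's own statement) =====
-- stated objective: simpler
-- what changed: Instead of incrementally maintaining a dict of mutable sets in one pass and then sorting each value in a second loop over the dict, B first dedupes the course ids (dict.fromkeys) and then builds the whole roster in one dict comprehension, computing each course's value directly as the sorted set of students filtered from the input.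
import Mathlib
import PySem

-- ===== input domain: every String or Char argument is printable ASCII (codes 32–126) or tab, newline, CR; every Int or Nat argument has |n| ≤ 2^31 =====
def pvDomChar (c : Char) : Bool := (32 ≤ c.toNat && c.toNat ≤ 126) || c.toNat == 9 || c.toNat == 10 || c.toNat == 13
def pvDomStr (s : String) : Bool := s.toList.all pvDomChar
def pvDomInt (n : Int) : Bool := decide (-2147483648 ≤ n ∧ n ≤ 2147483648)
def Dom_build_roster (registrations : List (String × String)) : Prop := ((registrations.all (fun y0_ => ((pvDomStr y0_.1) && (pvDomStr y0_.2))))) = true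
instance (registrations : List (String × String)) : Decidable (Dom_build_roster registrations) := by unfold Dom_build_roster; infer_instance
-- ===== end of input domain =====

-- B replaces A's incremental dict-of-sets plus second sorting loop by a single
-- per-course map over the deduplicated course list (objective: simpler).


-- ===== PORT A =====
-- first loop (the foldl): roster = {}; for (s, c): if c not in roster: roster[c] = set(); roster[c].add(s)
-- second loop (the map over items): for c in roster: roster[c] = sorted(roster[c]) —
-- a value-by-value reassignment of every key in iteration (= items) order; sorted() with
-- no key is order-independent on the set, so it is exact as a map over the items.
def build_roster (registrations : List (String × String)) : List (String × List String) :=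
  ((registrations.foldl
      (fun d p =>
        (if d.contains p.2 then d else d.insert p.2 PySem.Set.empty).modify
          p.2 PySem.Set.empty (fun t => t.add p.1))
      (PySem.Dict.empty : PySem.Dict String (PySem.Set String))).items.map
    (fun kv => (kv.1, PySem.List.sorted kv.2 (fun x => x) false)))

-- ===== PORT B =====
-- courses = list(dict.fromkeys(c for _, c in registrations))
-- {c: sorted({s for s, cc in registrations if cc == c}) for c in courses}
def build_roster_alt (registrations : List (String × String)) : List (String × List String) :=
  (PySem.List.dedup (registrations.map (fun p => p.2))).map (fun c =>
    (c, PySem.List.sorted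
          (PySem.Set.ofList ((registrations.filter (fun p => p.2 == c)).map (fun p => p.1)))
          (fun x => x) false))

-- ===== PRECONDITION & SPEC =====
def Spec_build_roster (registrations : List (String × String)) (out : List (String × List String)) : Prop := out = build_roster_alt registrations
instance (registrations : List (String × String)) (out : List (String × List String)) : Decidable (Spec_build_roster registrations out) := by unfold Spec_build_roster; infer_instance

-- ===== CLAIM (what is proved, stated in full; the proofs are below) =====
def Claim_equal_build_roster : Prop := ∀ (registrations : List (String × String)), Dom_build_roster registrations → Spec_build_roster registrations (build_roster registrations)

-- ===== LEMMAS AND PROOFS =====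

-- keys of A's grouping fold: a running Set.add of the course ids
theorem buildA_keys (registrations : List (String × String))
    (d : PySem.Dict String (PySem.Set String)) :
    (registrations.foldl
      (fun d p =>
        (if d.contains p.2 then d else d.insert p.2 PySem.Set.empty).modify
          p.2 PySem.Set.empty (fun t => t.add p.1)) d).keys
      = registrations.foldl (fun s p => PySem.Set.add s p.2) d.keys := by
  induction registrations generalizing d with
  | nil => rfl
  | cons p rest ih =>
      simp only [List.foldl_cons, ih]
      congr 1
      by_cases h : d.contains p.2 = true
      · have hm : p.2 ∈ d.keys := (PySem.Dict.contains_iff_mem_keys d p.2).1 h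
        simp only [h, if_pos, PySem.Dict.keys_modify,
          PySem.Dict.keys_insert_of_contains _ _ h]
        simp [PySem.Set.add, PySem.Set.contains, hm]
      · have h' : d.contains p.2 = false := by simpa using h
        have hm : p.2 ∉ d.keys :=
          fun hm => by simp [(PySem.Dict.contains_iff_mem_keys d p.2).2 hm] at h'
        simp only [h', if_neg, Bool.false_eq_true, not_false_iff,
          PySem.Dict.keys_modify]
        rw [PySem.Dict.keys_insert_of_contains _ _
            (PySem.Dict.contains_insert_self d p.2 PySem.Set.empty),
          PySem.Dict.keys_insert_of_not_contains _ _ h']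
        simp [PySem.Set.add, PySem.Set.contains, hm]

-- keys of A's grouping fold stay Nodup
theorem buildA_nodup (registrations : List (String × String))
    (d : PySem.Dict String (PySem.Set String)) (hd : d.keys.Nodup) :
    (registrations.foldl
      (fun d p =>
        (if d.contains p.2 then d else d.insert p.2 PySem.Set.empty).modify
          p.2 PySem.Set.empty (fun t => t.add p.1)) d).keys.Nodup := by
  induction registrations generalizing d with
  | nil => exact hd
  | cons p rest ih =>
      refine ih _ ?_
      have h1 : (if d.contains p.2 then d else d.insert p.2 PySem.Set.empty).keys.Nodup := by
        by_cases h : d.contains p.2 = true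
        · simpa [h] using hd
        · have h' : d.contains p.2 = false := by simpa using h
          simpa [h'] using PySem.Dict.nodup_keys_insert d p.2 PySem.Set.empty hd
      rw [PySem.Dict.keys_modify]
      exact PySem.Dict.nodup_keys_insert _ _ _ h1

-- one step of A's grouping fold, seen at course c's value
theorem buildA_step_getD (d : PySem.Dict String (PySem.Set String))
    (p : String × String) (c : String) :
    ((if d.contains p.2 then d else d.insert p.2 PySem.Set.empty).modify
        p.2 PySem.Set.empty (fun t => t.add p.1)).getD c PySem.Set.empty
      = if p.2 = c then (d.getD c PySem.Set.empty).add p.1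
        else d.getD c PySem.Set.empty := by
  by_cases hc : p.2 = c
  · subst hc
    rw [PySem.Dict.getD_modify, if_pos rfl, if_pos rfl]
    by_cases h : d.contains p.2 = true
    · rw [if_pos h]
    · have h' : d.contains p.2 = false := by simpa using h
      rw [if_neg (by simp [h']), PySem.Dict.getD_insert, if_pos rfl,
        PySem.Dict.getD_of_not_contains d PySem.Set.empty h']
  · have hc' : ¬ c = p.2 := fun hh => hc hh.symm
    rw [PySem.Dict.getD_modify, if_neg hc', if_neg hc]
    by_cases h : d.contains p.2 = true
    · rw [if_pos h]
    · have h' : d.contains p.2 = false := by simpa using h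
      rw [if_neg (by simp [h']), PySem.Dict.getD_insert, if_neg hc']

-- value at course c of A's grouping fold: a running Set.add of c's students
theorem buildA_getD (registrations : List (String × String))
    (d : PySem.Dict String (PySem.Set String)) (c : String) :
    (registrations.foldl
      (fun d p =>
        (if d.contains p.2 then d else d.insert p.2 PySem.Set.empty).modify
          p.2 PySem.Set.empty (fun t => t.add p.1)) d).getD c PySem.Set.empty
      = ((registrations.filter (fun p => p.2 == c)).map (fun p => p.1)).foldl
          PySem.Set.add (d.getD c PySem.Set.empty) := by
  induction registrations generalizing d with
  | nil => rfl
  | cons p rest ih =>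
      simp only [List.foldl_cons, ih, List.filter_cons]
      by_cases hc : p.2 = c
      · have hb : (p.2 == c) = true := by simp [hc]
        simp only [hb, if_pos, List.map_cons, List.foldl_cons]
        rw [buildA_step_getD, if_pos hc]
      · have hb : (p.2 == c) = false := by simp [hc]
        simp only [hb, Bool.false_eq_true, if_neg, not_false_iff]
        rw [buildA_step_getD, if_neg hc]

-- ===== VERDICT (by name: the statement is the Claim_ definition above) =====
theorem build_roster_spec : Claim_equal_build_roster := by
  intro registrations _
  unfold Spec_build_roster build_roster build_roster_alt
  have hnodup := buildA_nodup registrations PySem.Dict.empty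
    (by rw [PySem.Dict.keys_empty]; exact List.nodup_nil)
  have hkeys :
      (registrations.foldl
        (fun d p =>
          (if d.contains p.2 then d else d.insert p.2 PySem.Set.empty).modify
            p.2 PySem.Set.empty (fun t => t.add p.1))
        (PySem.Dict.empty : PySem.Dict String (PySem.Set String))).keys
      = PySem.List.dedup (registrations.map (fun p => p.2)) := by
    rw [buildA_keys, PySem.List.dedup_eq_ofList,
      show (PySem.Dict.empty : PySem.Dict String (PySem.Set String)).keys = ([] : List String)
        from PySem.Dict.keys_empty,
      ← PySem.Set.update_map_eq_foldl_add registrations (fun p => p.2) [],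
      PySem.Set.update_nil_left]
  have hgetD : ∀ c : String,
      (registrations.foldl
        (fun d p =>
          (if d.contains p.2 then d else d.insert p.2 PySem.Set.empty).modify
            p.2 PySem.Set.empty (fun t => t.add p.1))
        (PySem.Dict.empty : PySem.Dict String (PySem.Set String))).getD c PySem.Set.empty
        = PySem.Set.ofList ((registrations.filter (fun p => p.2 == c)).map (fun p => p.1)) := by
    intro c
    rw [buildA_getD, PySem.Dict.getD_empty, PySem.Set.ofList_eq_foldl]
    rfl
  rw [PySem.Dict.items_eq_map_keys _ hnodup PySem.Set.empty, hkeys, List.map_map]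
  refine List.map_congr_left ?_
  intro c _
  simp only [Function.comp, hgetD c]
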